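-- pv_equiv track=rewrite | github.com/AlexandraVorobeva/Yandex-algorithm-trainings | 1.0/hw6/6-B.py | isInSeq
-- ===== SOURCE A (Python) =====
-- def isInSeq(n, seq):
--     l, r = 0, len(seq) - 1
--     while r - l > 1:
--         m = (l + r) // 2
--         if n <= seq[m]:
--             r = m
--         else:
--             l = m
--     if seq[r] - n < n - seq[l]:
--         return seq[r]
--     return seq[l]
-- ===== SOURCE B (Python) =====
-- def isInSeq(n, seq):
--     if len(seq) <= 2:
--         a, b = seq[0], seq[-1]
--         return b if b - n < n - a else a
--     m = (len(seq) - 1) // 2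
--     return isInSeq(n, seq[:m + 1]) if n <= seq[m] else isInSeq(n, seq[m:])
-- ===== Notes on version B (the rewrite author's own statement) =====
-- stated objective: alternative
-- what changed: Replaces the index-pair (l, r) while-loop plus post-loop boundary comparison with structural recursion on shrinking sublists: the list itself is halved by slicing and the left/right choice happens at the recursion base, with no index arithmetic.
import Mathlib
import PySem

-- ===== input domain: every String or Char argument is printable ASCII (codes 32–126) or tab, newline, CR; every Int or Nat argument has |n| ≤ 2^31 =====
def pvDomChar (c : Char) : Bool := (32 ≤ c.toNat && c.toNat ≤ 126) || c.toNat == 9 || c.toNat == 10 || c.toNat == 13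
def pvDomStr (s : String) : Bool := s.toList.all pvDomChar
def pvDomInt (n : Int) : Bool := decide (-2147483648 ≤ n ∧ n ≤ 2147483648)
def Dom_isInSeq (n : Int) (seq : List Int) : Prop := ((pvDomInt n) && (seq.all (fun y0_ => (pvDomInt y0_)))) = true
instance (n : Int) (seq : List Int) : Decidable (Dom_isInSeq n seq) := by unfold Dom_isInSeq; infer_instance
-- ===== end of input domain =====

-- B replaces A's index-pair while-loop (plus post-loop boundary comparison) by structural
-- recursion on shrinking sublists, choosing between the two ends at the recursion base.

-- midpoint bounds, cited by the loop's decreasing_by and by the proofs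
theorem pvMidBounds (l r : Int) (h : 1 < r - l) :
    l < PySem.Int.floordiv (l + r) 2 ∧ PySem.Int.floordiv (l + r) 2 < r := by
  rw [PySem.Int.floordiv_eq_ediv_of_pos (by omega : (0:Int) < 2)]
  omega

-- relative midpoint bounds, cited by isInSeq_alt's decreasing_by
theorem pvMidRel (len : Nat) (h : ¬ len ≤ 2) :
    1 ≤ PySem.Int.floordiv ((len : Int) - 1) 2 ∧
      PySem.Int.floordiv ((len : Int) - 1) 2 ≤ (len : Int) - 2 := by
  rw [PySem.Int.floordiv_eq_ediv_of_pos (by omega : (0:Int) < 2)]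
  omega

-- xs[:b] and xs[a:] as take/drop for nonnegative bounds, cited by isInSeq_alt's decreasing_by
theorem pvSliceTake (xs : List Int) (b : Int) (hb : 0 ≤ b) :
    PySem.List.slice xs none (some b) = xs.take b.toNat := by
  conv_lhs => rw [show b = ((b.toNat : Nat) : Int) from by omega]
  exact PySem.List.slice_to_natCast xs b.toNat

theorem pvSliceDrop (xs : List Int) (a : Int) (ha : 0 ≤ a) :
    PySem.List.slice xs (some a) none = xs.drop a.toNat := by
  conv_lhs => rw [show a = ((a.toNat : Nat) : Int) from by omega]
  exact PySem.List.slice_from_natCast xs a.toNat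

-- ===== PORT A =====
-- the while loop over the state (l, r); on Pre_ inputs every index is in range, so pyGetD's default is never read
def isInSeqLoop (n : Int) (seq : List Int) (l r : Int) : Int × Int :=
  if h : r - l > 1 then
    let m := PySem.Int.floordiv (l + r) 2
    if n ≤ PySem.List.pyGetD seq m 0 then isInSeqLoop n seq l m
    else isInSeqLoop n seq m r
  else (l, r)
termination_by (r - l).toNat
decreasing_by
  · have := pvMidBounds l r h; omega
  · have := pvMidBounds l r h; omega

def isInSeq (n : Int) (seq : List Int) : Int :=
  let p := isInSeqLoop n seq 0 ((seq.length : Int) - 1)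
  if PySem.List.pyGetD seq p.2 0 - n < n - PySem.List.pyGetD seq p.1 0 then
    PySem.List.pyGetD seq p.2 0
  else
    PySem.List.pyGetD seq p.1 0

-- ===== PORT B =====
def isInSeq_alt (n : Int) (seq : List Int) : Int :=
  if seq.length ≤ 2 then
    let a := PySem.List.pyGetD seq 0 0
    let b := PySem.List.pyGetD seq (-1) 0
    if b - n < n - a then b else a
  else
    let m := PySem.Int.floordiv ((seq.length : Int) - 1) 2
    if n ≤ PySem.List.pyGetD seq m 0 then
      isInSeq_alt n (PySem.List.slice seq none (some (m + 1)))
    else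
      isInSeq_alt n (PySem.List.slice seq (some m) none)
termination_by seq.length
decreasing_by
  · rw [pvSliceTake seq (PySem.Int.floordiv ((seq.length : Int) - 1) 2 + 1)
      (by have := pvMidRel seq.length (by omega); omega)]
    have := pvMidRel seq.length (by omega)
    simp only [List.length_take]
    omega
  · rw [pvSliceDrop seq (PySem.Int.floordiv ((seq.length : Int) - 1) 2)
      (by have := pvMidRel seq.length (by omega); omega)]
    have := pvMidRel seq.length (by omega)
    simp only [List.length_drop]
    omega

-- ===== PRECONDITION & SPEC =====
-- Pre_ excludes exactly the empty sequence, on which A raises IndexError (at seq[-1]); B raises there too.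
def Pre_isInSeq (n : Int) (seq : List Int) : Prop := seq ≠ []
instance (n : Int) (seq : List Int) : Decidable (Pre_isInSeq n seq) := by unfold Pre_isInSeq; infer_instance

def pvWitness_isInSeq : Int × List Int := (7, [1, 4, 9, 12])

def Spec_isInSeq (n : Int) (seq : List Int) (out : Int) : Prop := out = isInSeq_alt n seq
instance (n : Int) (seq : List Int) (out : Int) : Decidable (Spec_isInSeq n seq out) := by unfold Spec_isInSeq; infer_instance

-- ===== CLAIM (what is proved, stated in full; the proofs are below) =====
def Claim_equal_isInSeq : Prop := ∀ (n : Int) (seq : List Int), Dom_isInSeq n seq → Pre_isInSeq n seq → Spec_isInSeq n seq (isInSeq n seq)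

-- ===== LEMMAS AND PROOFS =====

-- indexing into the window (seq.drop L).take T
theorem pvWinGet (seq : List Int) (L T j : Nat) (hj : j < T) :
    PySem.List.pyGetD ((seq.drop L).take T) ((j : Nat) : Int) 0
      = PySem.List.pyGetD seq (((L + j : Nat) : Nat) : Int) 0 := by
  rw [PySem.List.pyGetD_natCast, PySem.List.pyGetD_natCast]
  simp [List.getD_eq_getElem?_getD, hj, List.getElem?_drop]

theorem pvWinLast (seq : List Int) (L T : Nat) (hT : 0 < T) (hlen : L + T ≤ seq.length) :
    PySem.List.pyGetD ((seq.drop L).take T) (-1) 0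
      = PySem.List.pyGetD seq (((L + (T - 1) : Nat) : Nat) : Int) 0 := by
  have hw : ((seq.drop L).take T).length = T := by
    simp only [List.length_take, List.length_drop]
    omega
  rw [PySem.List.pyGetD_neg_ofNat ((seq.drop L).take T) 1 0 (by omega) (by omega)]
  have h2 : ((seq.drop L).take T)[((seq.drop L).take T).length - 1] =
      ((seq.drop L).take T).getD (((seq.drop L).take T).length - 1) 0 :=
    (List.getD_eq_getElem _ _ _).symm
  rw [h2, hw, ← PySem.List.pyGetD_natCast, pvWinGet seq L T (T - 1) (by omega)]

-- the recursion on windows computes exactly the loop's endpoint choice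
theorem pvKey (n : Int) (seq : List Int) : ∀ (k : Nat) (l r : Int),
    (r - l).toNat ≤ k → 0 ≤ l → l ≤ r → r < (seq.length : Int) →
    isInSeq_alt n ((seq.drop l.toNat).take (r.toNat + 1 - l.toNat)) =
      (if PySem.List.pyGetD seq (isInSeqLoop n seq l r).2 0 - n
            < n - PySem.List.pyGetD seq (isInSeqLoop n seq l r).1 0
        then PySem.List.pyGetD seq (isInSeqLoop n seq l r).2 0
        else PySem.List.pyGetD seq (isInSeqLoop n seq l r).1 0) := by
  intro k
  induction k with
  | zero =>
    intro l r hk h0 hlr hrlen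
    have hgap : r - l ≤ 1 := by omega
    have hw : ((seq.drop l.toNat).take (r.toNat + 1 - l.toNat)).length = r.toNat + 1 - l.toNat := by
      simp only [List.length_take, List.length_drop]; omega
    rw [isInSeq_alt, if_pos (by omega), isInSeqLoop, dif_neg (by omega)]
    have ha := pvWinGet seq l.toNat (r.toNat + 1 - l.toNat) 0 (by omega)
    have hb := pvWinLast seq l.toNat (r.toNat + 1 - l.toNat) (by omega) (by omega)
    simp only [Nat.cast_zero, Nat.add_zero] at ha
    rw [ha, hb]
    have e1 : ((l.toNat : Nat) : Int) = l := by omega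
    have e2 : ((l.toNat + (r.toNat + 1 - l.toNat - 1) : Nat) : Int) = r := by omega
    rw [e1, e2]
  | succ k ih =>
    intro l r hk h0 hlr hrlen
    by_cases hgap : r - l ≤ 1
    · -- same as the base case: both sides stop immediately
      have hw : ((seq.drop l.toNat).take (r.toNat + 1 - l.toNat)).length = r.toNat + 1 - l.toNat := by
        simp only [List.length_take, List.length_drop]; omega
      rw [isInSeq_alt, if_pos (by omega), isInSeqLoop, dif_neg (by omega)]
      have ha := pvWinGet seq l.toNat (r.toNat + 1 - l.toNat) 0 (by omega)
      have hb := pvWinLast seq l.toNat (r.toNat + 1 - l.toNat) (by omega) (by omega)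
      simp only [Nat.cast_zero, Nat.add_zero] at ha
      rw [ha, hb]
      have e1 : ((l.toNat : Nat) : Int) = l := by omega
      have e2 : ((l.toNat + (r.toNat + 1 - l.toNat - 1) : Nat) : Int) = r := by omega
      rw [e1, e2]
    · have hw : ((seq.drop l.toNat).take (r.toNat + 1 - l.toNat)).length = r.toNat + 1 - l.toNat := by
        simp only [List.length_take, List.length_drop]; omega
      obtain ⟨hm1, hm2⟩ := pvMidBounds l r (by omega)
      have hmrel : l + PySem.Int.floordiv (r - l) 2 = PySem.Int.floordiv (l + r) 2 := by
        rw [PySem.Int.floordiv_eq_ediv_of_pos (by omega : (0:Int) < 2),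
          PySem.Int.floordiv_eq_ediv_of_pos (by omega : (0:Int) < 2)]
        omega
      set m := PySem.Int.floordiv (l + r) 2 with hm
      have hmw : PySem.Int.floordiv ((((seq.drop l.toNat).take (r.toNat + 1 - l.toNat)).length : Int) - 1) 2
          = m - l := by
        rw [hw, show ((r.toNat + 1 - l.toNat : Nat) : Int) - 1 = r - l from by omega, ← hmrel]
        omega
      have hjm : ((l.toNat + (m - l).toNat : Nat) : Int) = m := by omega
      have hmid : PySem.List.pyGetD ((seq.drop l.toNat).take (r.toNat + 1 - l.toNat)) (m - l) 0
          = PySem.List.pyGetD seq m 0 := by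
        conv_lhs => rw [show m - l = (((m - l).toNat : Nat) : Int) from by omega]
        rw [pvWinGet seq l.toNat (r.toNat + 1 - l.toNat) (m - l).toNat (by omega), hjm]
      rw [isInSeq_alt, if_neg (by omega), isInSeqLoop, dif_pos (by omega)]
      simp only [← hm, hmw, hmid]
      by_cases hc : n ≤ PySem.List.pyGetD seq m 0
      · rw [if_pos hc, if_pos hc]
        have hseq : PySem.List.slice ((seq.drop l.toNat).take (r.toNat + 1 - l.toNat)) none
            (some (m - l + 1)) = (seq.drop l.toNat).take (m.toNat + 1 - l.toNat) := by
          rw [pvSliceTake _ _ (by omega), List.take_take]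
          congr 1
          omega
        rw [hseq]
        exact ih l m (by omega) h0 (by omega) (by omega)
      · rw [if_neg hc, if_neg hc]
        have hseq : PySem.List.slice ((seq.drop l.toNat).take (r.toNat + 1 - l.toNat))
            (some (m - l)) none = (seq.drop m.toNat).take (r.toNat + 1 - m.toNat) := by
          rw [pvSliceDrop _ _ (by omega), List.drop_take, List.drop_drop]
          congr 1
          · omega
          · congr 1
            omega
        rw [hseq]
        exact ih m r (by omega) (by omega) (by omega) hrlen

theorem pvAEqB (n : Int) (seq : List Int) (hne : seq ≠ []) : isInSeq n seq = isInSeq_alt n seq := by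
  have hlen : 0 < seq.length := List.length_pos_of_ne_nil hne
  have hkey := pvKey n seq (((seq.length : Int) - 1 - 0).toNat) 0 ((seq.length : Int) - 1)
    le_rfl le_rfl (by omega) (by omega)
  have hwin : (seq.drop (0 : Int).toNat).take (((seq.length : Int) - 1).toNat + 1 - (0 : Int).toNat)
      = seq := by
    simp only [Int.toNat_zero, List.drop_zero]
    rw [show ((seq.length : Int) - 1).toNat + 1 - 0 = seq.length from by omega]
    exact List.take_length
  rw [hwin] at hkey
  simp only [isInSeq]
  exact hkey.symm

-- ===== VERDICT (by name: the statement is the Claim_ definition above) =====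
theorem isInSeq_spec : Claim_equal_isInSeq := by
  intro n seq _ hpre
  exact pvAEqB n seq hpre
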